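-- pv_equiv track=rewrite | github.com/dkipnis2/NaiveBayesFlightDelays | Case2Final.py | genArr
-- ===== SOURCE A (Python) =====
-- def genArr(ex):
--     atr = []
--     ind = len(ex[0])-1
--     for i in range(0,ind):
--         for row in ex:
--             add=True
--             for ent in atr:
--                 if(ent[1]==row[i] and ent[0]==i):
--                     add=False
--                     if(row[ind]==0):
--                          ent[2]+=1
--                     if(row[ind]==1):
--                          ent[3]+=1
--             if(add):
--                 atr.append([i,row[i],0,0])
--                 if(row[ind]==0):
--                      atr[len(atr)-1][2]+=1
--                 if(row[ind]==1):
--                      atr[len(atr)-1][3]+=1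
--     return atr
-- ===== SOURCE B (Python) =====
-- def genArr(ex):
--     # Staged per-column passes: extract the column and the labels, deduplicate the
--     # column values (first-appearance order), then COUNT the 0/1-labelled matches
--     # for each distinct value -- no incremental table, no in-place increments.
--     ind = len(ex[0]) - 1
--     atr = []
--     for i in range(ind):
--         col = [row[i] for row in ex]
--         lab = [row[ind] for row in ex]
--         for v in dict.fromkeys(col):
--             atr.append([i, v,
--                         sum(1 for x, c in zip(col, lab) if x == v and c == 0),
--                         sum(1 for x, c in zip(col, lab) if x == v and c == 1)])
--     return atr
-- ===== Notes on version B (the rewrite author's own statement) =====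
-- stated objective: faster
-- what changed: Replaces A's incremental table (scanning the entire accumulated cross-column table for every cell and bumping counters in place) by staged per-column passes: extract the column and label lists, deduplicate the column values in first-appearance order, then compute each entry's two counters by counting matches over the column-label pairs; per cell this touches only that column's values rather than the whole table.
import Mathlib
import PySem

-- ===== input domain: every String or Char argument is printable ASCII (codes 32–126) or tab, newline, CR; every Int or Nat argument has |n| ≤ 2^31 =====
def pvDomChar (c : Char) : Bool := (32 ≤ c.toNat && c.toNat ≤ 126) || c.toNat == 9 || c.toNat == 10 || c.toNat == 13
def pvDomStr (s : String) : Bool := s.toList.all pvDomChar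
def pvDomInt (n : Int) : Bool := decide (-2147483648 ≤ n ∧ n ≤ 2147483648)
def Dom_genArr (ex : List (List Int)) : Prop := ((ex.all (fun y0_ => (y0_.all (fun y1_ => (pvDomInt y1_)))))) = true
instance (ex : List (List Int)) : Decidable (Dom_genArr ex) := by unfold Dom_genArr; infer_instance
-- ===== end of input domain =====

-- B replaces A's incremental table (inner scan + in-place increments) by staged per-column
-- passes: deduplicate the column's values, then count the 0/1-labelled matches per value
-- (objective: alternative decomposition, no mutation of entries).

-- ===== PORT A =====
-- does ent[1]==row[i] and ent[0]==i (entries are the 4-lists A builds; anything else never matches)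
def genArrMatch (i ri : Int) (ent : List Int) : Bool :=
  match ent with
  | [a, b, _, _] => b == ri && a == i
  | _ => false

-- ent[2] += 1 if row[ind]==0; ent[3] += 1 if row[ind]==1 (in-place index update, done by rebuilding the 4-list)
def genArrBump (rv : Int) (ent : List Int) : List Int :=
  match ent with
  | [a, b, c, d] => [a, b, if rv = 0 then c + 1 else c, if rv = 1 then d + 1 else d]
  | _ => ent

-- the 'for ent in atr' scan: rebuild atr (Python mutates in place), track the 'add' flag
def genArrScanEnt (i ri rv : Int) (st : List (List Int) × Bool) (ent : List Int) :
    List (List Int) × Bool :=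
  if genArrMatch i ri ent then (st.1 ++ [genArrBump rv ent], false)
  else (st.1 ++ [ent], st.2)

-- body of 'for row in ex' inside column i; row[i] / row[ind] via pyGetD 0 (Pre_ excludes the
-- inputs where Python's row[i] / row[ind] would raise IndexError)
def genArrRowStep (i ind : Int) (atr : List (List Int)) (row : List Int) : List (List Int) :=
  let ri := PySem.List.pyGetD row i 0
  let rv := PySem.List.pyGetD row ind 0
  let res := atr.foldl (genArrScanEnt i ri rv) ([], true)
  if res.2 then
    res.1 ++ [[i, ri, if rv = 0 then 1 else 0, if rv = 1 then 1 else 0]]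
  else res.1

def genArr (ex : List (List Int)) : List (List Int) :=
  match ex with
  | [] => []  -- Python raises IndexError on ex[0]; excluded by Pre_
  | h :: _ =>
    let ind : Int := (h.length : Int) - 1
    (PySem.List.pyRange 0 ind 1).foldl (fun atr i => ex.foldl (genArrRowStep i ind) atr) []

-- ===== PORT B =====
-- one appended entry: [i, v, count of (x,c) with x==v and c==0, count with x==v and c==1]
def genArrAltEntry (i v : Int) (col lab : List Int) : List Int :=
  [i, v, ((col.zip lab).countP (fun p => p.1 == v && p.2 == 0) : Int),
         ((col.zip lab).countP (fun p => p.1 == v && p.2 == 1) : Int)]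

def genArr_alt (ex : List (List Int)) : List (List Int) :=
  match ex with
  | [] => []  -- Python raises IndexError on len(ex[0]); excluded by Pre_
  | h :: _ =>
    let ind : Int := (h.length : Int) - 1
    (PySem.List.pyRange 0 ind 1).foldl
      (fun atr i =>
        let col := ex.map (fun row => PySem.List.pyGetD row i 0)
        let lab := ex.map (fun row => PySem.List.pyGetD row ind 0)
        atr ++ (PySem.Set.ofList col).map (fun v => genArrAltEntry i v col lab))
      []

-- ===== PRECONDITION & SPEC =====
-- Pre_ excludes exactly the inputs where Python A raises IndexError: the empty example list
-- (ex[0]), and — when there is at least one attribute column — a row shorter than the first row.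
def Pre_genArr (ex : List (List Int)) : Prop :=
  ex ≠ [] ∧ (1 < ex.headI.length → ∀ row ∈ ex, ex.headI.length ≤ row.length)
instance (ex : List (List Int)) : Decidable (Pre_genArr ex) := by unfold Pre_genArr; infer_instance

def pvWitness_genArr : List (List Int) := [[1, 5, 0], [1, 7, 1], [2, 5, 1]]

def Spec_genArr (ex : List (List Int)) (out : List (List Int)) : Prop := out = genArr_alt ex
instance (ex : List (List Int)) (out : List (List Int)) : Decidable (Spec_genArr ex out) := by
  unfold Spec_genArr; infer_instance

-- ===== CLAIM (what is proved, stated in full; the proofs are below) =====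
def Claim_equal_genArr : Prop :=
  ∀ (ex : List (List Int)), Dom_genArr ex → Pre_genArr ex → Spec_genArr ex (genArr ex)

-- ===== LEMMAS AND PROOFS =====

-- the canonical value both ports compute: per column i, the (value, class) pairs …
def colPairs (ex : List (List Int)) (i ind : Int) : List (Int × Int) :=
  ex.map (fun row => (PySem.List.pyGetD row i 0, PySem.List.pyGetD row ind 0))

-- … the count of pairs (v, c) …
def cnt (ps : List (Int × Int)) (v c : Int) : Int :=
  (ps.countP (fun p => p.1 == v && p.2 == c) : Int)

-- … the table entry for value v of column i …
def entryOf (i v : Int) (ps : List (Int × Int)) : List Int := [i, v, cnt ps v 0, cnt ps v 1]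

-- … the block of column i: one entry per distinct value, in first-appearance order …
def blockOf (i : Int) (ps : List (Int × Int)) : List (List Int) :=
  (PySem.Set.ofList (ps.map Prod.fst)).map (fun v => entryOf i v ps)

-- … and the whole table, column-major.
def canon (ex : List (List Int)) (ind : Int) : List (List Int) :=
  (PySem.List.pyRange 0 ind 1).flatMap (fun i => blockOf i (colPairs ex i ind))

theorem pyRange_pairwise_lt (a b : Int) : (PySem.List.pyRange a b 1).Pairwise (· < ·) := by
  by_cases h : a < b
  · have hm : (b - a).toNat ≠ 0 := by omega
    obtain ⟨n, hn⟩ : ∃ n, (b - a).toNat = n := ⟨_, rfl⟩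
    induction n generalizing a with
    | zero => omega
    | succ n ih =>
      rw [PySem.List.pyRange_one_cons h]
      refine List.pairwise_cons.2 ⟨?_, ?_⟩
      · intro x hx; rw [PySem.List.mem_pyRange_one] at hx; omega
      · by_cases h2 : a + 1 < b
        · exact ih (a + 1) h2 (by omega) (by omega)
        · have : PySem.List.pyRange (a + 1) b 1 = [] := by
            rw [List.eq_nil_iff_forall_not_mem]
            intro x hx; rw [PySem.List.mem_pyRange_one] at hx; omega
          simp [this]
  · have : PySem.List.pyRange a b 1 = [] := by
      rw [List.eq_nil_iff_forall_not_mem]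
      intro x hx; rw [PySem.List.mem_pyRange_one] at hx; omega
    simp [this]

theorem scan_foldl (i ri rv : Int) (l : List (List Int)) (acc : List (List Int)) (add : Bool) :
    l.foldl (genArrScanEnt i ri rv) (acc, add) =
    (acc ++ l.map (fun e => if genArrMatch i ri e then genArrBump rv e else e),
     add && !(l.any (genArrMatch i ri))) := by
  induction l generalizing acc add with
  | nil => simp
  | cons e l ih =>
    simp only [List.foldl_cons, List.map_cons, List.any_cons, genArrScanEnt]
    by_cases h : genArrMatch i ri e
    · simp [h, ih]
    · simp [h, ih]

theorem match_entryOf (i ri j v : Int) (ps : List (Int × Int)) :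
    genArrMatch i ri (entryOf j v ps) = (v == ri && j == i) := by
  simp [genArrMatch, entryOf]

theorem cnt_snoc (ps : List (Int × Int)) (w c v c' : Int) :
    cnt (ps ++ [(w, c)]) v c' = cnt ps v c' + if w = v ∧ c = c' then 1 else 0 := by
  by_cases hb : (w == v && c == c') = true
  · have hw : w = v ∧ c = c' := by simpa using hb
    simp only [cnt, List.countP_append, List.countP_cons, List.countP_nil, hb, if_pos hw]
    push_cast; ring
  · have hw : ¬ (w = v ∧ c = c') := by simpa using hb
    simp only [cnt, List.countP_append, List.countP_cons, List.countP_nil, hb, if_neg hw]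
    push_cast; ring

theorem cnt_not_mem (ps : List (Int × Int)) (v c : Int) (h : v ∉ ps.map Prod.fst) :
    cnt ps v c = 0 := by
  simp only [cnt]
  norm_cast
  rw [List.countP_eq_zero]
  intro p hp
  have : p.1 ≠ v := by
    intro he; exact h (List.mem_map.2 ⟨p, hp, he⟩)
  simp [this]

theorem bump_entryOf (i v rv : Int) (ps : List (Int × Int)) :
    genArrBump rv (entryOf i v ps) = entryOf i v (ps ++ [(v, rv)]) := by
  simp only [entryOf, genArrBump, cnt_snoc]
  split_ifs <;> simp_all

theorem entryOf_snoc_ne (i v ri rv : Int) (ps : List (Int × Int)) (h : v ≠ ri) :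
    entryOf i v (ps ++ [(ri, rv)]) = entryOf i v ps := by
  simp only [entryOf, cnt_snoc]
  split_ifs <;> simp_all

theorem setOfList_snoc {α : Type} [BEq α] [LawfulBEq α] (l : List α) (x : α) :
    PySem.Set.ofList (l ++ [x]) =
    (if x ∈ l then PySem.Set.ofList l else PySem.Set.ofList l ++ [x]) := by
  rw [PySem.Set.ofList_eq_foldl, List.foldl_append]
  rw [← PySem.Set.ofList_eq_foldl]
  simp only [List.foldl_cons, List.foldl_nil, PySem.Set.add]
  by_cases h : x ∈ l
  · simp [PySem.Set.contains, (PySem.Set.mem_ofList l x).2 h, h]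
  · have : x ∉ PySem.Set.ofList l := fun hc => h ((PySem.Set.mem_ofList l x).1 hc)
    simp [PySem.Set.contains, this, h]

theorem rowStep_block (i ind : Int) (prev : List (List Int)) (ps : List (Int × Int))
    (row : List Int) (hprev : ∀ e ∈ prev, ∀ r, genArrMatch i r e = false) :
    genArrRowStep i ind (prev ++ blockOf i ps) row =
    prev ++ blockOf i (ps ++ [(PySem.List.pyGetD row i 0, PySem.List.pyGetD row ind 0)]) := by
  simp only [genArrRowStep]
  rw [scan_foldl]
  set ri := PySem.List.pyGetD row i 0 with hri
  set rv := PySem.List.pyGetD row ind 0 with hrv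
  have hmapprev : prev.map (fun e => if genArrMatch i ri e then genArrBump rv e else e) = prev := by
    rw [List.map_congr_left (g := id) (fun e he => by simp [hprev e he ri])]
    exact List.map_id _
  have hanyprev : prev.any (genArrMatch i ri) = false := by
    rw [List.any_eq_false]; intro e he; simp [hprev e he ri]
  simp only [List.map_append, List.any_append, hmapprev, hanyprev, Bool.false_or, Bool.true_and]
  simp only [blockOf, List.map_map, List.any_map]
  have hm : ∀ v : Int, genArrMatch i ri (entryOf i v ps) = (v == ri) := by
    intro v; simp [match_entryOf]
  by_cases hmem : ri ∈ ps.map Prod.fst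
  · have hany : ((PySem.Set.ofList (ps.map Prod.fst)).any
        (genArrMatch i ri ∘ fun v => entryOf i v ps)) = true := by
      rw [List.any_eq_true]
      refine ⟨ri, (PySem.Set.mem_ofList _ _).2 hmem, ?_⟩
      simp only [Function.comp_apply, hm ri, beq_self_eq_true]
    rw [if_neg (by simp [hany])]
    rw [List.map_congr_left (g := fun v => entryOf i v (ps ++ [(ri, rv)]))
      (fun v _ => by
        simp only [Function.comp_apply]
        by_cases hvr : v = ri
        · rw [hvr, if_pos (by simp [hm ri])]
          exact bump_entryOf i ri rv ps
        · rw [if_neg (by simp [hm v, hvr])]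
          exact (entryOf_snoc_ne i v ri rv ps hvr).symm)]
    simp [List.map_append, setOfList_snoc, hmem]
  · have hany : ((PySem.Set.ofList (ps.map Prod.fst)).any
        (genArrMatch i ri ∘ fun v => entryOf i v ps)) = false := by
      rw [List.any_eq_false]
      intro v hv
      have hvr : v ≠ ri := by
        intro he; exact hmem (he ▸ (PySem.Set.mem_ofList _ _).1 hv)
      simp [Function.comp_apply, hm v, hvr]
    rw [if_pos (by simp [hany])]
    rw [List.map_congr_left (g := fun v => entryOf i v (ps ++ [(ri, rv)]))
      (fun v hv => by
        have hvr : v ≠ ri := by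
          intro he; exact hmem (he ▸ (PySem.Set.mem_ofList _ _).1 hv)
        simp only [Function.comp_apply]
        rw [if_neg (by simp [hm v, hvr])]
        exact (entryOf_snoc_ne i v ri rv ps hvr).symm)]
    have hsing : [i, ri, if rv = 0 then (1 : Int) else 0, if rv = 1 then (1 : Int) else 0] =
        entryOf i ri (ps ++ [(ri, rv)]) := by
      have e0 : ∀ c : Int, cnt (ps ++ [(ri, rv)]) ri c = if rv = c then 1 else 0 := by
        intro c
        rw [cnt_snoc, cnt_not_mem ps ri c hmem]
        split_ifs <;> omega
      simp only [entryOf, e0]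
    rw [hsing]
    simp [List.map_append, setOfList_snoc, hmem, List.append_assoc]

theorem blockOf_nil (i : Int) : blockOf i [] = [] := rfl

theorem col_fold (i ind : Int) (exs : List (List Int)) (ps : List (Int × Int))
    (prev : List (List Int)) (hprev : ∀ e ∈ prev, ∀ r, genArrMatch i r e = false) :
    exs.foldl (genArrRowStep i ind) (prev ++ blockOf i ps) =
    prev ++ blockOf i (ps ++ colPairs exs i ind) := by
  induction exs generalizing ps with
  | nil => simp [colPairs]
  | cons row t ih =>
    simp only [List.foldl_cons]
    rw [rowStep_block i ind prev ps row hprev,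
      ih (ps ++ [(PySem.List.pyGetD row i 0, PySem.List.pyGetD row ind 0)])]
    simp [colPairs, List.append_assoc]

theorem entry_no_match (j i v r : Int) (ps : List (Int × Int)) (h : j ≠ i) :
    genArrMatch i r (entryOf j v ps) = false := by
  simp [match_entryOf, h]

theorem outer_fold (ind : Int) (exs : List (List Int)) (js : List Int)
    (hnd : js.Pairwise (· ≠ ·)) (prev : List (List Int))
    (hprev : ∀ e ∈ prev, ∀ j ∈ js, ∀ r, genArrMatch j r e = false) :
    js.foldl (fun atr i => exs.foldl (genArrRowStep i ind) atr) prev =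
    prev ++ js.flatMap (fun i => blockOf i (colPairs exs i ind)) := by
  induction js generalizing prev with
  | nil => simp
  | cons j tl ih =>
    rw [List.pairwise_cons] at hnd
    simp only [List.foldl_cons]
    have h1 : exs.foldl (genArrRowStep j ind) prev = prev ++ blockOf j (colPairs exs j ind) := by
      have := col_fold j ind exs [] prev
        (fun e he r => hprev e he j (List.mem_cons_self) r)
      simpa [blockOf_nil] using this
    rw [h1, ih hnd.2 (prev ++ blockOf j (colPairs exs j ind)) ?_]
    · simp [List.append_assoc]
    · intro e he j' hj' r
      rcases List.mem_append.1 he with hp | hb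
      · exact hprev e hp j' (List.mem_cons_of_mem _ hj') r
      · simp only [blockOf, List.mem_map] at hb
        obtain ⟨v, _, rfl⟩ := hb
        exact entry_no_match j j' v r _ (hnd.1 j' hj')

theorem genArr_eq_canon' (ex : List (List Int)) (h : List Int) (t : List (List Int))
    (hex : ex = h :: t) : genArr ex = canon ex ((h.length : Int) - 1) := by
  subst hex
  simp only [genArr, canon]
  have := outer_fold ((h.length : Int) - 1) (h :: t)
    (PySem.List.pyRange 0 ((h.length : Int) - 1) 1)
    ((pyRange_pairwise_lt 0 ((h.length : Int) - 1)).imp (fun hlt => Int.ne_of_lt hlt))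
    [] (by intro e he; simp at he)
  simpa using this

-- B side: each per-column block B appends is exactly blockOf; the fold of appends is the flatMap
theorem alt_block_eq (ex : List (List Int)) (i ind : Int) :
    (PySem.Set.ofList (ex.map (fun row => PySem.List.pyGetD row i 0))).map
      (fun v => genArrAltEntry i v (ex.map (fun row => PySem.List.pyGetD row i 0))
        (ex.map (fun row => PySem.List.pyGetD row ind 0))) =
    blockOf i (colPairs ex i ind) := by
  have hzip : (ex.map (fun row => PySem.List.pyGetD row i 0)).zip
      (ex.map (fun row => PySem.List.pyGetD row ind 0)) = colPairs ex i ind := by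
    rw [colPairs, List.zip_map']
  have hfst : (colPairs ex i ind).map Prod.fst =
      ex.map (fun row => PySem.List.pyGetD row i 0) := by
    simp [colPairs, List.map_map]
  rw [blockOf, hfst]
  apply List.map_congr_left
  intro v _
  simp only [genArrAltEntry, entryOf, cnt, hzip]

theorem alt_fold (ex : List (List Int)) (ind : Int) (js : List Int) (acc : List (List Int)) :
    js.foldl
      (fun atr i =>
        atr ++ (PySem.Set.ofList (ex.map (fun row => PySem.List.pyGetD row i 0))).map
          (fun v => genArrAltEntry i v (ex.map (fun row => PySem.List.pyGetD row i 0))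
            (ex.map (fun row => PySem.List.pyGetD row ind 0)))) acc =
    acc ++ js.flatMap (fun i => blockOf i (colPairs ex i ind)) := by
  induction js generalizing acc with
  | nil => simp
  | cons j tl ih =>
    simp only [List.foldl_cons, List.flatMap_cons]
    rw [alt_block_eq, ih, List.append_assoc]

theorem genArr_alt_eq_canon' (ex : List (List Int)) (h : List Int) (t : List (List Int))
    (hex : ex = h :: t) : genArr_alt ex = canon ex ((h.length : Int) - 1) := by
  subst hex
  simp only [genArr_alt, canon]
  rw [alt_fold]
  simp

-- ===== VERDICT (by name: the statement is the Claim_ definition above) =====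
theorem genArr_spec : Claim_equal_genArr := by
  intro ex _ _
  unfold Spec_genArr
  match hex : ex with
  | [] => rfl
  | h :: t => rw [genArr_eq_canon' (h :: t) h t rfl, genArr_alt_eq_canon' (h :: t) h t rfl]
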